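-- pv_equiv track=rewrite | github.com/Sophia-Schuur/Language-Design | 3 - Python Basics/BasicFunctions.py | busStops
-- ===== SOURCE A (Python) =====
-- def busStops(b):
-- 	ret = {}
-- 	stops = []
-- 	for bus in b:				# each bus route (key) and its list of stops
-- 		stops = b[bus]			# put each stop into new list stops
--
-- 		for stop in stops:		# for each individual stop in list stops
-- 			if stop not in ret:			# if the stop does not exist in ret
-- 				ret[stop] = [bus]			# map key at this current stop to current bus route
-- 			else:
-- 				newStops = ret[stop]
-- 				newStops.append(bus)	# add current bus route key to newStops
-- 				newStops.sort()			# sort alpabetically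
--
-- 	return ret
-- ===== SOURCE B (Python) =====
-- def busStops(b):
-- 	ret = {}
-- 	for stops in b.values():			# pass 1: record each stop key at its first occurrence
-- 		for stop in stops:
-- 			ret.setdefault(stop, [])
-- 	for bus in sorted(b):				# pass 2: visit buses in sorted order, so each
-- 		for stop in b[bus]:				# stop's bus list is built already sorted --
-- 			ret[stop].append(bus)		# no per-element or final sort anywhere
-- 	return ret
-- ===== Notes on version B (the rewrite author's own statement) =====
-- stated objective: faster
-- what changed: Instead of appending each bus and re-sorting the stop's list on every insertion, B pre-records the stop keys in one pass and then visits buses in sorted key order, so every stop's bus list comes out already sorted with no sort inside or after the loop.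
import Mathlib
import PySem

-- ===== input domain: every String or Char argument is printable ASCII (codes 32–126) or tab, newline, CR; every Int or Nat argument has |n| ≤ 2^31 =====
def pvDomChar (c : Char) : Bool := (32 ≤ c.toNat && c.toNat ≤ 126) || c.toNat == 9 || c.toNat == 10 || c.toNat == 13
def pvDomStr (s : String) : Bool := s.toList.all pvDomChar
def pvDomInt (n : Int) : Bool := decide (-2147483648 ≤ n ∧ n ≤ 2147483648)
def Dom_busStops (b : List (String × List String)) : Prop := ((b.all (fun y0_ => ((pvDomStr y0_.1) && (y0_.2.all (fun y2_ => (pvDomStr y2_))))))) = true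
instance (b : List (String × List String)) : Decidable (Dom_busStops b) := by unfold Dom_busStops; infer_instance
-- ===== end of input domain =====

-- B inverts the bus→stops dict by visiting buses in sorted key order and appending, so each
-- stop's bus list is built already sorted and no sort runs inside or after the loop
-- (alternative algorithm; same return value, key order and all).

-- ===== PORT A =====
-- the body of A's inner loop: ret[stop] = [bus] for a new stop, else append bus and sort in place
def busStopsStep (bus : String) (ret : PySem.Dict String (List String)) (stop : String) : PySem.Dict String (List String) :=
  if ret.contains stop = false then
    ret.insert stop [bus]
  else
    ret.modify stop [] (fun l => PySem.List.sorted (l ++ [bus]) (fun x => x) false)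

def busStops (b : List (String × List String)) : List (String × List String) :=
  let d := PySem.Dict.ofList b
  (d.keys.foldl
    (fun ret bus =>
      let stops := d.getD bus []      -- b[bus]; exact: bus is drawn from d.keys, so no KeyError
      stops.foldl (busStopsStep bus) ret)
    PySem.Dict.empty).items

-- ===== PORT B =====
def busStops_alt (b : List (String × List String)) : List (String × List String) :=
  let d := PySem.Dict.ofList b
  -- pass 1: record each stop key at its first occurrence, with an empty bus list
  let ret0 := d.values.foldl
    (fun ret stops => stops.foldl (fun ret stop => ret.setdefault stop []) ret)
    PySem.Dict.empty
  -- pass 2: buses in sorted order; ret[stop].append(bus) — exact: pass 1 made every stop a key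
  ((PySem.List.sorted d.keys (fun x => x) false).foldl
    (fun ret bus =>
      (d.getD bus []).foldl (fun ret stop => ret.modify stop [] (fun l => l ++ [bus])) ret)
    ret0).items

-- ===== PRECONDITION & SPEC =====
def Spec_busStops (b : List (String × List String)) (out : List (String × List String)) : Prop := out = busStops_alt b
instance (b : List (String × List String)) (out : List (String × List String)) : Decidable (Spec_busStops b out) := by unfold Spec_busStops; infer_instance

-- ===== CLAIM (what is proved, stated in full; the proofs are below) =====
def Claim_equal_busStops : Prop := ∀ (b : List (String × List String)), Dom_busStops b → Spec_busStops b (busStops b)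

-- ===== LEMMAS AND PROOFS =====

-- the buses recorded for stop s when the keys ks are visited in this order (with multiplicity)
def pvOcc (d : PySem.Dict String (List String)) (s : String) (ks : List String) : List String :=
  ks.flatMap (fun k => List.replicate ((d.getD k []).count s) k)

-- the effect of one dict-key insertion on the key list
def pvAddKey (ks : List String) (x : String) : List String :=
  if x ∈ ks then ks else ks ++ [x]

theorem pvSortedSingle (x : String) : PySem.List.sorted [x] (fun y => y) false = [x] :=
  PySem.List.sorted_eq_self_of_pairwise _ _ (List.pairwise_singleton _ _)

theorem stepA_getD_self (bus : String) (r : PySem.Dict String (List String)) (s : String) :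
    (busStopsStep bus r s).getD s [] = PySem.List.sorted (r.getD s [] ++ [bus]) (fun x => x) false := by
  unfold busStopsStep
  by_cases h : r.contains s = false
  · rw [if_pos h, PySem.Dict.getD_insert_self, PySem.Dict.getD_of_not_contains r [] h]
    simp [pvSortedSingle]
  · rw [if_neg h, PySem.Dict.getD_modify_self]

theorem stepA_getD_ne (bus : String) (r : PySem.Dict String (List String)) {s stop : String}
    (h : s ≠ stop) : (busStopsStep bus r stop).getD s [] = r.getD s [] := by
  unfold busStopsStep
  split_ifs
  · exact PySem.Dict.getD_insert_of_ne r _ _ h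
  · exact PySem.Dict.getD_modify_of_ne r _ _ h

theorem innerA_getD (bus s : String) (stops : List String) :
    ∀ r : PySem.Dict String (List String),
      PySem.List.sorted (r.getD s []) (fun x => x) false = r.getD s [] →
      (stops.foldl (busStopsStep bus) r).getD s []
        = PySem.List.sorted (r.getD s [] ++ List.replicate (stops.count s) bus) (fun x => x) false := by
  induction stops with
  | nil => intro r h; simpa using h.symm
  | cons stop rest ih =>
    intro r h
    simp only [List.foldl_cons]
    by_cases hs : stop = s
    · subst hs
      have h1 := stepA_getD_self bus r stop
      rw [ih _ (by rw [h1]; exact PySem.List.sorted_sorted _ _), h1]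
      apply PySem.List.sorted_eq_sorted_of_perm _ _ _ (fun a b hab => hab)
      have hp1 : (PySem.List.sorted (r.getD stop [] ++ [bus]) (fun x => x) false
            ++ List.replicate (rest.count stop) bus).Perm
          ((r.getD stop [] ++ [bus]) ++ List.replicate (rest.count stop) bus) :=
        (PySem.List.sorted_perm _ _ _).append_right _
      have he : (r.getD stop [] ++ [bus]) ++ List.replicate (rest.count stop) bus
          = r.getD stop [] ++ List.replicate ((stop :: rest).count stop) bus := by
        rw [List.append_assoc]
        simp [List.replicate_succ]
      rw [he] at hp1
      exact hp1
    · rw [ih (busStopsStep bus r stop)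
          (by rw [stepA_getD_ne bus r (fun he => hs he.symm)]; exact h),
        stepA_getD_ne bus r (fun he => hs he.symm)]
      have : (stop :: rest).count s = rest.count s := by
        simp [hs]
      rw [this]

theorem outerA_getD (d : PySem.Dict String (List String)) (s : String) (ks : List String) :
    ∀ r : PySem.Dict String (List String),
      PySem.List.sorted (r.getD s []) (fun x => x) false = r.getD s [] →
      (ks.foldl (fun ret bus => (d.getD bus []).foldl (busStopsStep bus) ret) r).getD s []
        = PySem.List.sorted (r.getD s [] ++ pvOcc d s ks) (fun x => x) false := by
  induction ks with
  | nil => intro r h; simpa [pvOcc] using h.symm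
  | cons k rest ih =>
    intro r h
    simp only [List.foldl_cons]
    have h1 := innerA_getD k s (d.getD k []) r h
    rw [ih _ (by rw [h1]; exact PySem.List.sorted_sorted _ _), h1]
    apply PySem.List.sorted_eq_sorted_of_perm _ _ _ (fun a b hab => hab)
    have hp1 : (PySem.List.sorted (r.getD s [] ++ List.replicate ((d.getD k []).count s) k) (fun x => x) false
          ++ pvOcc d s rest).Perm
        ((r.getD s [] ++ List.replicate ((d.getD k []).count s) k) ++ pvOcc d s rest) :=
      (PySem.List.sorted_perm _ _ _).append_right _
    have he : (r.getD s [] ++ List.replicate ((d.getD k []).count s) k) ++ pvOcc d s rest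
        = r.getD s [] ++ pvOcc d s (k :: rest) := by
      rw [List.append_assoc]; simp [pvOcc, List.flatMap_cons]
    rw [he] at hp1
    exact hp1

theorem innerB_getD (bus s : String) (stops : List String) :
    ∀ r : PySem.Dict String (List String),
      (stops.foldl (fun ret stop => ret.modify stop [] (fun l => l ++ [bus])) r).getD s []
        = r.getD s [] ++ List.replicate (stops.count s) bus := by
  induction stops with
  | nil => intro r; simp
  | cons stop rest ih =>
    intro r
    simp only [List.foldl_cons]
    rw [ih]
    by_cases hs : stop = s
    · subst hs
      rw [PySem.Dict.getD_modify_self]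
      simp [List.replicate_succ, List.append_assoc]
    · rw [PySem.Dict.getD_modify_of_ne r [] _ (fun he => hs he.symm)]
      simp [hs]

theorem outerB_getD (d : PySem.Dict String (List String)) (s : String) (ks : List String) :
    ∀ r : PySem.Dict String (List String),
      (ks.foldl (fun ret bus =>
          (d.getD bus []).foldl (fun ret stop => ret.modify stop [] (fun l => l ++ [bus])) ret) r).getD s []
        = r.getD s [] ++ pvOcc d s ks := by
  induction ks with
  | nil => intro r; simp [pvOcc]
  | cons k rest ih =>
    intro r
    simp only [List.foldl_cons]
    rw [ih, innerB_getD]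
    simp [pvOcc, List.flatMap_cons, List.append_assoc]

theorem phase1_getD (t : String) (stops : List String) :
    ∀ r : PySem.Dict String (List String), r.getD t [] = [] →
      (stops.foldl (fun ret stop => ret.setdefault stop []) r).getD t [] = [] := by
  induction stops with
  | nil => intro r h; simpa using h
  | cons stop rest ih =>
    intro r h
    simp only [List.foldl_cons]
    apply ih
    by_cases hc : r.contains stop = true
    · rw [PySem.Dict.setdefault_of_contains r [] hc, h]
    · rw [PySem.Dict.setdefault_of_not_contains r [] (by simpa using hc),
        PySem.Dict.getD_insert]
      split_ifs with he
      · rfl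
      · exact h

theorem phase1_outer_getD (t : String) (vss : List (List String)) :
    ∀ r : PySem.Dict String (List String), r.getD t [] = [] →
      (vss.foldl (fun ret stops => stops.foldl (fun ret stop => ret.setdefault stop []) ret) r).getD t [] = [] := by
  induction vss with
  | nil => intro r h; simpa using h
  | cons vs rest ih =>
    intro r h
    simp only [List.foldl_cons]
    exact ih _ (phase1_getD t vs r h)

-- ===== key-list lemmas =====

theorem keys_stepA (bus : String) (r : PySem.Dict String (List String)) (stop : String) :
    (busStopsStep bus r stop).keys = pvAddKey r.keys stop := by
  unfold busStopsStep pvAddKey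
  by_cases h : r.contains stop = true
  · rw [if_neg (by simp [h]), PySem.Dict.keys_modify,
      PySem.Dict.keys_insert_of_contains r _ h,
      if_pos ((PySem.Dict.contains_iff_mem_keys r stop).mp h)]
  · have h' : r.contains stop = false := by simpa using h
    rw [if_pos h', PySem.Dict.keys_insert_of_not_contains r _ h',
      if_neg (fun hm => by simp [(PySem.Dict.contains_iff_mem_keys r stop).mpr hm] at h')]

theorem keys_setdefault (r : PySem.Dict String (List String)) (stop : String) :
    (r.setdefault stop ([] : List String)).keys = pvAddKey r.keys stop := by
  unfold pvAddKey
  by_cases h : r.contains stop = true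
  · rw [PySem.Dict.setdefault_of_contains r _ h,
      if_pos ((PySem.Dict.contains_iff_mem_keys r stop).mp h)]
  · have h' : r.contains stop = false := by simpa using h
    rw [PySem.Dict.setdefault_of_not_contains r _ h',
      PySem.Dict.keys_insert_of_not_contains r _ h',
      if_neg (fun hm => by simp [(PySem.Dict.contains_iff_mem_keys r stop).mpr hm] at h')]

theorem keys_modifyB (bus : String) (r : PySem.Dict String (List String)) (stop : String) :
    (r.modify stop [] (fun l => l ++ [bus])).keys = pvAddKey r.keys stop := by
  unfold pvAddKey
  rw [PySem.Dict.keys_modify]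
  by_cases h : r.contains stop = true
  · rw [PySem.Dict.keys_insert_of_contains r _ h,
      if_pos ((PySem.Dict.contains_iff_mem_keys r stop).mp h)]
  · have h' : r.contains stop = false := by simpa using h
    rw [PySem.Dict.keys_insert_of_not_contains r _ h',
      if_neg (fun hm => by simp [(PySem.Dict.contains_iff_mem_keys r stop).mpr hm] at h')]

theorem keys_foldl_of_addKey (f : PySem.Dict String (List String) → String → PySem.Dict String (List String))
    (hf : ∀ r x, (f r x).keys = pvAddKey r.keys x) (stops : List String) :
    ∀ r : PySem.Dict String (List String), (stops.foldl f r).keys = stops.foldl pvAddKey r.keys := by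
  induction stops with
  | nil => intro r; rfl
  | cons stop rest ih =>
    intro r
    simp only [List.foldl_cons]
    rw [ih, hf]

theorem keys_outerA (d : PySem.Dict String (List String)) (ks : List String) :
    ∀ r : PySem.Dict String (List String),
      (ks.foldl (fun ret bus => (d.getD bus []).foldl (busStopsStep bus) ret) r).keys
        = (ks.flatMap (fun k => d.getD k [])).foldl pvAddKey r.keys := by
  induction ks with
  | nil => intro r; rfl
  | cons k rest ih =>
    intro r
    simp only [List.foldl_cons, List.flatMap_cons, List.foldl_append]
    rw [ih, keys_foldl_of_addKey _ (keys_stepA k)]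

theorem keys_outerB (d : PySem.Dict String (List String)) (ks : List String) :
    ∀ r : PySem.Dict String (List String),
      (ks.foldl (fun ret bus =>
          (d.getD bus []).foldl (fun ret stop => ret.modify stop [] (fun l => l ++ [bus])) ret) r).keys
        = (ks.flatMap (fun k => d.getD k [])).foldl pvAddKey r.keys := by
  induction ks with
  | nil => intro r; rfl
  | cons k rest ih =>
    intro r
    simp only [List.foldl_cons, List.flatMap_cons, List.foldl_append]
    rw [ih, keys_foldl_of_addKey _ (fun r x => keys_modifyB k r x)]

theorem keys_phase1 (vss : List (List String)) :
    ∀ r : PySem.Dict String (List String),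
      (vss.foldl (fun ret stops => stops.foldl (fun ret stop => ret.setdefault stop []) ret) r).keys
        = (vss.flatMap (fun vs => vs)).foldl pvAddKey r.keys := by
  induction vss with
  | nil => intro r; rfl
  | cons vs rest ih =>
    intro r
    simp only [List.foldl_cons, List.flatMap_cons, List.foldl_append]
    rw [ih, keys_foldl_of_addKey _ keys_setdefault]

theorem mem_foldl_addKey (L : List String) :
    ∀ (K : List String) (x : String), x ∈ L.foldl pvAddKey K ↔ x ∈ K ∨ x ∈ L := by
  induction L with
  | nil => intro K x; simp
  | cons y rest ih =>
    intro K x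
    simp only [List.foldl_cons, ih, List.mem_cons]
    unfold pvAddKey
    split_ifs with hy
    · constructor
      · rintro (h | h) <;> tauto
      · rintro (h | h | h)
        · tauto
        · subst h; tauto
        · tauto
    · simp only [List.mem_append, List.mem_singleton]
      tauto

theorem foldl_addKey_of_subset (L : List String) :
    ∀ K : List String, (∀ x ∈ L, x ∈ K) → L.foldl pvAddKey K = K := by
  induction L with
  | nil => intro K _; rfl
  | cons y rest ih =>
    intro K h
    simp only [List.foldl_cons]
    have : pvAddKey K y = K := by unfold pvAddKey; rw [if_pos (h y (by simp))]
    rw [this]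
    exact ih K (fun x hx => h x (by simp [hx]))

theorem nodup_foldl_addKey (L : List String) :
    ∀ K : List String, K.Nodup → (L.foldl pvAddKey K).Nodup := by
  induction L with
  | nil => intro K h; exact h
  | cons y rest ih =>
    intro K h
    simp only [List.foldl_cons]
    apply ih
    unfold pvAddKey
    split_ifs with hy
    · exact h
    · simp only [List.nodup_append, List.nodup_singleton, true_and]
      exact ⟨h, fun a ha b hb hab => hy (List.mem_singleton.mp hb ▸ hab ▸ ha)⟩

-- B's final value at any stop is already in nondecreasing order
theorem pvOcc_sorted_pairwise (d : PySem.Dict String (List String)) (s : String) (ks : List String) :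
    (pvOcc d s (PySem.List.sorted ks (fun x => x) false)).Pairwise (· ≤ ·) := by
  unfold pvOcc
  rw [List.flatMap_def, List.pairwise_flatten]
  constructor
  · intro l hl
    simp only [List.mem_map] at hl
    obtain ⟨k, _, hk⟩ := hl
    subst hk
    rw [List.pairwise_replicate]
    right; exact le_refl k
  · rw [List.pairwise_map]
    have hp : (PySem.List.sorted ks (fun x => x) false).Pairwise (fun a b => a ≤ b) :=
      PySem.List.sorted_pairwise ks (fun x => x)
    refine hp.imp ?_
    intro a b hab x hx y hy
    rw [List.eq_of_mem_replicate hx, List.eq_of_mem_replicate hy]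
    exact hab

-- A's incrementally re-sorted value equals B's pre-sorted one
theorem pvVal_eq (d : PySem.Dict String (List String)) (s : String) (ks : List String) :
    PySem.List.sorted (pvOcc d s ks) (fun x => x) false
      = pvOcc d s (PySem.List.sorted ks (fun x => x) false) := by
  apply PySem.List.sorted_id_eq_of_perm_of_pairwise
  · exact (PySem.List.sorted_perm ks (fun x => x) false).flatMap (fun a _ => List.Perm.refl _)
  · exact pvOcc_sorted_pairwise d s ks

theorem busStops_eq_alt (b : List (String × List String)) : busStops b = busStops_alt b := by
  unfold busStops busStops_alt
  simp only []
  set d := PySem.Dict.ofList b with hd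
  have hnd : d.keys.Nodup := PySem.Dict.nodup_keys_ofList b
  set sk := PySem.List.sorted d.keys (fun x => x) false with hsk
  set A := d.keys.foldl (fun ret bus => (d.getD bus []).foldl (busStopsStep bus) ret)
      (PySem.Dict.empty : PySem.Dict String (List String)) with hA
  set R0 := d.values.foldl (fun ret stops => stops.foldl (fun ret stop => ret.setdefault stop []) ret)
      (PySem.Dict.empty : PySem.Dict String (List String)) with hR0
  set B := sk.foldl (fun ret bus =>
      (d.getD bus []).foldl (fun ret stop => ret.modify stop [] (fun l => l ++ [bus])) ret) R0 with hB
  -- the flattened stop sequences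
  have hvals : d.values.flatMap (fun vs => vs) = d.keys.flatMap (fun k => d.getD k []) := by
    rw [PySem.Dict.values_eq_map_keys d hnd [], List.flatMap_map]
  -- key lists
  have hKA : A.keys = (d.keys.flatMap (fun k => d.getD k [])).foldl pvAddKey [] := by
    rw [hA, keys_outerA, PySem.Dict.keys_empty]
  have hKR0 : R0.keys = (d.keys.flatMap (fun k => d.getD k [])).foldl pvAddKey [] := by
    rw [hR0, keys_phase1, PySem.Dict.keys_empty, hvals]
  have hKB : B.keys = A.keys := by
    rw [hB, keys_outerB, hKR0, hKA]
    apply foldl_addKey_of_subset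
    intro x hx
    rw [mem_foldl_addKey]
    right
    simp only [List.mem_flatMap] at hx ⊢
    obtain ⟨k, hk, hxk⟩ := hx
    exact ⟨k, (PySem.List.mem_sorted _ _ _ _).mp hk, hxk⟩
  have hnA : A.keys.Nodup := by rw [hKA]; exact nodup_foldl_addKey _ [] List.nodup_nil
  have hnB : B.keys.Nodup := by rw [hKB]; exact hnA
  -- values
  have hvA : ∀ s, A.getD s [] = PySem.List.sorted (pvOcc d s d.keys) (fun x => x) false := by
    intro s
    rw [hA, outerA_getD d s d.keys PySem.Dict.empty (by simp [PySem.Dict.getD_empty]; rfl)]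
    simp [PySem.Dict.getD_empty]
  have hvB : ∀ s, B.getD s [] = pvOcc d s sk := by
    intro s
    rw [hB, outerB_getD, phase1_outer_getD s d.values PySem.Dict.empty (PySem.Dict.getD_empty s [])]
    simp
  -- assemble
  rw [PySem.Dict.items_eq_map_keys A hnA [], PySem.Dict.items_eq_map_keys B hnB [], hKB]
  apply List.map_congr_left
  intro k _
  rw [hvA k, hvB k, hsk, pvVal_eq]

-- ===== VERDICT (by name: the statement is the Claim_ definition above) =====
theorem busStops_spec : Claim_equal_busStops := by
  intro b _
  unfold Spec_busStops
  exact busStops_eq_alt b
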